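-- pv_equiv track=rewrite | github.com/Youngseo-Jeon0313/baekjoon | 카카오/카카오5.py | solution
-- ===== SOURCE A (Python) =====
-- from collections import deque
--
-- move = [[0,1],[1,0],[0,-1],[-1,0]]
--
-- def Rotate(rc):
--     copyarr=[[] for _ in range(len(rc))]
--     for i in range(len(rc)):
--         copyarr[i]=rc[i][:]
--     row=0; column=0;
--     for dx,dy in move:
--         while True:
--             nx=row+dx; ny=column+dy
--             if (row==0 or row==len(rc)-1 or column==0 or column==len(rc[0])-1) and 0<=nx<len(rc) and 0<=ny<len(rc[0]):
--                 rc[nx][ny]=copyarr[row][column]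
--                 row=nx; column=ny
--             else: break
--     return rc
--
-- def solution(rc, operations):
--     rc=deque(rc)
--     for j in operations:
--         if j=="ShiftRow":
--             rc.appendleft(rc.pop())
--         else:
--             Rotate(rc)
--     return (list(rc))
-- ===== SOURCE B (Python) =====
-- def _rotate_border(rc):
--     # rotate the border ring clockwise in place, touching only O(R+C) cells
--     if not rc or not rc[0]:
--         return rc
--     n, m = len(rc), len(rc[0])
--     path = [(0, j) for j in range(m)]
--     path += [(i, m - 1) for i in range(1, n)]
--     path += [(n - 1, j) for j in range(m - 2, -1, -1)]
--     path += [(i, 0) for i in range(n - 2, -1, -1)]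
--     vals = [rc[i][j] for (i, j) in path]
--     for k in range(len(path) - 1):
--         i, j = path[k + 1]
--         rc[i][j] = vals[k]
--     return rc
--
-- def solution(rc, operations):
--     rows = list(rc)
--     for op in operations:
--         if op == "ShiftRow":
--             rows = rows[-1:] + rows[:-1]
--         else:
--             rows = _rotate_border(rows)
--     return rows
-- ===== Notes on version B (the rewrite author's own statement) =====
-- stated objective: faster
-- what changed: Instead of copying the whole R x C matrix on every rotate and walking it with four in-place while-loops, B precomputes the clockwise border path once per rotate, snapshots only the O(R+C) border values and writes them back shifted by one; row shifts become a slice concatenation.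
import Mathlib
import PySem

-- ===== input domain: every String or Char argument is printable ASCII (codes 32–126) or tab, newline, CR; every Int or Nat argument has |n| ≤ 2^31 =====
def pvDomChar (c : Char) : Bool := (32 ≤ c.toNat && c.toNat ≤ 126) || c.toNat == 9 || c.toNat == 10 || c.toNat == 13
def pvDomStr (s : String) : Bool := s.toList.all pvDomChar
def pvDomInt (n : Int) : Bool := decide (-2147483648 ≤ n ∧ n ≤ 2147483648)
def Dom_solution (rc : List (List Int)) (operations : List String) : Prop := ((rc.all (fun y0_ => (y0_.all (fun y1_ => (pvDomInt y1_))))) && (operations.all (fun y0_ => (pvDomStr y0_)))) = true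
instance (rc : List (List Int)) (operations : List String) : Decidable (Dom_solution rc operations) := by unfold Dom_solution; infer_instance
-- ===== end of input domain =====

-- B rotates only the O(R+C) border cells per rotate instead of copying the whole
-- matrix; equivalence is about the RETURN value (the Python A mutates the row lists
-- of its argument in place, and the Python B performs the same in-place row updates).

-- ===== PORT A =====
-- cell read rc[i][j] / write rc[i][j] = v (indices always in range when reached under Pre_)
def get2 (mat : List (List Int)) (i j : Nat) : Int := (mat.getD i []).getD j 0
def set2 (mat : List (List Int)) (i j : Nat) (v : Int) : List (List Int) :=
  mat.set i ((mat.getD i []).set j v)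

def pvMove : List (Int × Int) := [(0,1),(1,0),(0,-1),(-1,0)]

-- the inner `while True` of Rotate; fuel n+m+1 strictly exceeds the ≤ max(n,m) steps
-- any single direction can take, so the guard below never cuts a real run short
def rotWhile (copy : List (List Int)) (dx dy : Int) :
    Nat → List (List Int) × Int × Int → List (List Int) × Int × Int
  | 0, s => s
  | fuel+1, s =>
      let rc := s.1
      let row := s.2.1
      let col := s.2.2
      let nx := row + dx
      let ny := col + dy
      if (row = 0 ∨ row = (rc.length : Int) - 1 ∨ col = 0 ∨ col = ((rc.headD []).length : Int) - 1)
          ∧ (0 ≤ nx ∧ nx < (rc.length : Int)) ∧ (0 ≤ ny ∧ ny < ((rc.headD []).length : Int)) then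
        rotWhile copy dx dy fuel (set2 rc nx.toNat ny.toNat (get2 copy row.toNat col.toNat), nx, ny)
      else s

-- Rotate(rc): copyarr is a copy of rc (immutable value here), then the four direction walks
def pyRotate (rc : List (List Int)) : List (List Int) :=
  let copy := rc
  let fuel := rc.length + (rc.headD []).length + 1
  (pvMove.foldl (fun s d => rotWhile copy d.1 d.2 fuel s) (rc, 0, 0)).1

def solution (rc : List (List Int)) (operations : List String) : List (List Int) :=
  operations.foldl (fun rc j =>
    if j = "ShiftRow" then
      -- rc.appendleft(rc.pop()); pop on an empty deque raises (excluded by Pre_)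
      match rc.getLast? with
      | some last => last :: rc.dropLast
      | none => rc
    else pyRotate rc) rc

-- ===== PORT B =====
-- clockwise border path starting at (0,0): top row, right column, bottom row
-- right-to-left, left column bottom-to-top
def borderPath (n m : Nat) : List (Nat × Nat) :=
  ((List.range m).map (fun j => ((0:Nat), j)))
  ++ ((List.range (n-1)).map (fun i => (1+i, m-1)))
  ++ ((List.range (m-1)).reverse.map (fun j => (n-1, j)))
  ++ ((List.range (n-1)).reverse.map (fun i => (i, (0:Nat))))

def rotB (rc : List (List Int)) : List (List Int) :=
  if rc.isEmpty || (rc.headD []).isEmpty then rc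
  else
    let n := rc.length
    let m := (rc.headD []).length
    let path := borderPath n m
    let vals := path.map (fun p => get2 rc p.1 p.2)
    (path.tail.zip vals).foldl (fun acc pv => set2 acc pv.1.1 pv.1.2 pv.2) rc

def solution_alt (rc : List (List Int)) (operations : List String) : List (List Int) :=
  operations.foldl (fun rows op =>
    if op = "ShiftRow" then
      rows.drop (rows.length - 1) ++ rows.take (rows.length - 1)
    else rotB rows) rc

-- ===== PRECONDITION & SPEC =====
-- Pre_ excludes exactly the inputs on which the Python A raises: a "ShiftRow" on an
-- empty matrix (IndexError popping from an empty deque), and a rotation performed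
-- while some row is shorter than the row currently at the top (IndexError writing
-- past the end of the short row).  The fold below only counts the "ShiftRow"
-- operations seen so far (which row is on top) and compares row LENGTHS; on every
-- input A returns on — rectangular or ragged — B returns the same value.
def Pre_solution (rc : List (List Int)) (operations : List String) : Prop :=
  (rc = [] → "ShiftRow" ∉ operations) ∧
  (operations.foldl (fun (st : Nat × Bool) op =>
      if op = "ShiftRow" then (st.1 + 1, st.2)
      else (st.1,
        st.2 && rc.all (fun r =>
          (rc.getD ((rc.length - st.1 % rc.length) % rc.length) []).length ≤ r.length)))
    (0, true)).2 = true
instance (rc : List (List Int)) (operations : List String) : Decidable (Pre_solution rc operations) := by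
  unfold Pre_solution; infer_instance

def pvWitness_solution : List (List Int) × List String :=
  ([[1, 2], [3, 4]], ["Rotate", "ShiftRow"])

def Spec_solution (rc : List (List Int)) (operations : List String) (out : List (List Int)) : Prop := out = solution_alt rc operations
instance (rc : List (List Int)) (operations : List String) (out : List (List Int)) : Decidable (Spec_solution rc operations out) := by unfold Spec_solution; infer_instance

-- ===== CLAIM (what is proved, stated in full; the proofs are below) =====
def Claim_equal_solution : Prop := ∀ (rc : List (List Int)) (operations : List String), Dom_solution rc operations → Pre_solution rc operations → Spec_solution rc operations (solution rc operations)


-- ===== LEMMAS AND PROOFS =====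

-- proof-side helpers
def rowlen (rc : List (List Int)) : Nat := (rc.headD []).length

def applyPairs (copy : List (List Int)) (l : List ((Nat × Nat) × (Nat × Nat)))
    (rc : List (List Int)) : List (List Int) :=
  l.foldl (fun acc ts => set2 acc ts.1.1 ts.1.2 (get2 copy ts.2.1 ts.2.2)) rc

def pairsFrom (prev : Nat × Nat) (l : List (Nat × Nat)) : List ((Nat × Nat) × (Nat × Nat)) :=
  l.zip (prev :: l)

theorem map_length_set2 (mat : List (List Int)) (i j : Nat) (v : Int) :
    (set2 mat i j v).map List.length = mat.map List.length := by
  induction mat generalizing i with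
  | nil => simp [set2]
  | cons a t ih =>
    cases i with
    | zero => simp [set2]
    | succ i =>
      have := ih i
      simp [set2] at this ⊢
      exact this

theorem length_set2 (mat : List (List Int)) (i j : Nat) (v : Int) :
    (set2 mat i j v).length = mat.length := by simp [set2]

theorem rowlen_eq (rc : List (List Int)) : rowlen rc = (rc.map List.length).headD 0 := by
  cases rc <;> simp [rowlen]

theorem rowlen_set2 (mat : List (List Int)) (i j : Nat) (v : Int) :
    rowlen (set2 mat i j v) = rowlen mat := by
  rw [rowlen_eq, rowlen_eq, map_length_set2]

theorem applyPairs_nil (copy rc : List (List Int)) : applyPairs copy [] rc = rc := rfl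

theorem applyPairs_cons (copy rc : List (List Int)) (ts : (Nat × Nat) × (Nat × Nat))
    (l : List ((Nat × Nat) × (Nat × Nat))) :
    applyPairs copy (ts :: l) rc = applyPairs copy l (set2 rc ts.1.1 ts.1.2 (get2 copy ts.2.1 ts.2.2)) := rfl

theorem applyPairs_append (copy rc : List (List Int)) (l1 l2 : List ((Nat × Nat) × (Nat × Nat))) :
    applyPairs copy (l1 ++ l2) rc = applyPairs copy l2 (applyPairs copy l1 rc) := by
  simp [applyPairs, List.foldl_append]

theorem shape_applyPairs (copy rc : List (List Int)) (l : List ((Nat × Nat) × (Nat × Nat))) :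
    (applyPairs copy l rc).map List.length = rc.map List.length := by
  induction l generalizing rc with
  | nil => rfl
  | cons ts l ih => rw [applyPairs_cons, ih, map_length_set2]

theorem length_applyPairs (copy rc : List (List Int)) (l : List ((Nat × Nat) × (Nat × Nat))) :
    (applyPairs copy l rc).length = rc.length := by
  have := congrArg List.length (shape_applyPairs copy rc l)
  simpa using this

theorem rowlen_applyPairs (copy rc : List (List Int)) (l : List ((Nat × Nat) × (Nat × Nat))) :
    rowlen (applyPairs copy l rc) = rowlen rc := by
  rw [rowlen_eq, rowlen_eq, shape_applyPairs]

theorem pairsFrom_nil (p : Nat × Nat) : pairsFrom p [] = [] := rfl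

theorem pairsFrom_cons (p a : Nat × Nat) (l : List (Nat × Nat)) :
    pairsFrom p (a :: l) = (a, p) :: pairsFrom a l := rfl

theorem pairsFrom_append (l1 l2 : List (Nat × Nat)) (p : Nat × Nat) :
    pairsFrom p (l1 ++ l2) = pairsFrom p l1 ++ pairsFrom (l1.getLastD p) l2 := by
  induction l1 generalizing p with
  | nil => simp [pairsFrom_nil]
  | cons a t ih =>
    rw [List.cons_append, pairsFrom_cons, ih a, pairsFrom_cons, List.getLastD_cons,
      List.cons_append]

theorem getLastD_map_range {A : Type} (k : Nat) (f : Nat → A) (d : A) :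
    ((List.range k).map f).getLastD d = if k = 0 then d else f (k - 1) := by
  cases k with
  | zero => rfl
  | succ k => simp [List.range_succ]

theorem getLastD_reverse_map_range {A : Type} (k : Nat) (f : Nat → A) (d : A) :
    ((List.range k).reverse.map f).getLastD d = if k = 0 then d else f 0 := by
  cases k with
  | zero => rfl
  | succ k =>
    simp only [List.getLastD_eq_getLast?]
    simp [List.range_succ_eq_map]

theorem rotWhile_stop (copy : List (List Int)) (dx dy : Int) (fuel : Nat)
    (rc : List (List Int)) (row col : Int)
    (h : ¬ ((row = 0 ∨ row = (rc.length : Int) - 1 ∨ col = 0 ∨ col = ((rc.headD []).length : Int) - 1)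
        ∧ (0 ≤ row + dx ∧ row + dx < (rc.length : Int)) ∧ (0 ≤ col + dy ∧ col + dy < ((rc.headD []).length : Int)))) :
    rotWhile copy dx dy fuel (rc, row, col) = (rc, row, col) := by
  cases fuel with
  | zero => rfl
  | succ f => rw [rotWhile]; exact if_neg h

theorem runRight (copy : List (List Int)) :
    ∀ (k e : Nat) (rc : List (List Int)) (c : Nat),
      0 < rc.length → c + k + 1 = rowlen rc →
      rotWhile copy 0 1 (k+1+e) (rc, 0, (c : Int)) =
        (applyPairs copy (pairsFrom (0, c) ((List.range k).map (fun t => ((0:Nat), c+1+t)))) rc,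
         0, ((c + k : Nat) : Int)) := by
  intro k
  induction k with
  | zero =>
    intro e rc c h0 hm
    rw [rotWhile_stop]
    · simp [pairsFrom_nil, applyPairs_nil]
    · intro h
      have := h.2.2.2
      rw [show (rc.headD []).length = rowlen rc from rfl] at this
      omega
  | succ k ih =>
    intro e rc c h0 hm
    have hf : k+1+1+e = (k+1+e)+1 := by omega
    rw [hf, rotWhile]
    rw [if_pos]
    · have hx : ((0 : Int) + 0) = (0 : Int) := by norm_num
      have hny : ((c : Int) + 1).toNat = c + 1 := by omega
      have h0' : (0 : Int).toNat = 0 := rfl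
      have hc : (c : Int).toNat = c := by omega
      simp only [hx, hny, h0', hc]
      have hcast : ((c : Int) + 1) = ((c + 1 : Nat) : Int) := by push_cast; ring
      rw [hcast]
      have hlen : 0 < (set2 rc 0 (c+1) (get2 copy 0 c)).length := by
        rw [length_set2]; exact h0
      have hrl : (c+1) + k + 1 = rowlen (set2 rc 0 (c+1) (get2 copy 0 c)) := by
        rw [rowlen_set2]; omega
      rw [ih e _ (c+1) hlen hrl]
      rw [show c+(k+1) = c+1+k from by omega]
      rw [List.range_succ_eq_map, List.map_cons, List.map_map, pairsFrom_cons, applyPairs_cons]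
      have hfun : ((fun t => ((0:Nat), c+1+t)) ∘ Nat.succ) = (fun t => ((0:Nat), c+1+1+t)) := by
        funext t
        simp only [Function.comp_apply]
        exact congrArg (fun z => ((0:Nat), z)) (by omega : c+1+(t+1) = c+1+1+t)
      rw [hfun]
    · refine ⟨Or.inl rfl, ⟨by norm_num, by simpa using h0⟩, ⟨?_, ?_⟩⟩
      · show (0:Int) ≤ (c:Int) + 1
        omega
      · show (c:Int) + 1 < ((rc.headD []).length : Int)
        rw [show (rc.headD []).length = rowlen rc from rfl]
        omega

theorem runDown (copy : List (List Int)) :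
    ∀ (k e : Nat) (rc : List (List Int)) (r m : Nat),
      r + k + 1 = rc.length → rowlen rc = m → 0 < m →
      rotWhile copy 1 0 (k+1+e) (rc, (r : Int), ((m-1 : Nat) : Int)) =
        (applyPairs copy (pairsFrom (r, m-1) ((List.range k).map (fun t => (r+1+t, m-1)))) rc,
         ((r + k : Nat) : Int), ((m-1 : Nat) : Int)) := by
  intro k
  induction k with
  | zero =>
    intro e rc r m hn hm h2
    rw [rotWhile_stop]
    · simp [pairsFrom_nil, applyPairs_nil]
    · intro h
      have := h.2.1.2
      omega
  | succ k ih =>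
    intro e rc r m hn hm h2
    have hf : k+1+1+e = (k+1+e)+1 := by omega
    rw [hf, rotWhile]
    rw [if_pos]
    · have hnx : ((r : Int) + 1).toNat = r + 1 := by omega
      have hny : (((m-1 : Nat) : Int) + 0).toNat = m - 1 := by omega
      have hr : (r : Int).toNat = r := by omega
      have hcm : (((m-1 : Nat) : Int)).toNat = m - 1 := by omega
      simp only [hnx, hny, hr, hcm]
      have hcast : ((r : Int) + 1) = ((r + 1 : Nat) : Int) := by push_cast; ring
      have hcast2 : (((m-1 : Nat) : Int) + 0) = ((m-1 : Nat) : Int) := by ring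
      rw [hcast, hcast2]
      have h1' : (r+1) + k + 1 = (set2 rc (r+1) (m-1) (get2 copy r (m-1))).length := by
        rw [length_set2]; omega
      have h2' : rowlen (set2 rc (r+1) (m-1) (get2 copy r (m-1))) = m := by
        rw [rowlen_set2]; exact hm
      rw [ih e _ (r+1) m h1' h2' h2]
      rw [show r+(k+1) = r+1+k from by omega]
      rw [List.range_succ_eq_map, List.map_cons, List.map_map, pairsFrom_cons, applyPairs_cons]
      have hfun : ((fun t => (r+1+t, m-1)) ∘ Nat.succ) = (fun t => (r+1+1+t, m-1)) := by
        funext t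
        simp only [Function.comp_apply]
        exact congrArg (fun z => (z, m-1)) (by omega : r+1+(t+1) = r+1+1+t)
      rw [hfun]
    · refine ⟨Or.inr (Or.inr (Or.inr ?_)), ⟨?_, ?_⟩, ⟨?_, ?_⟩⟩
      · show ((m-1 : Nat) : Int) = ((rc.headD []).length : Int) - 1
        rw [show (rc.headD []).length = rowlen rc from rfl]
        omega
      · show (0:Int) ≤ (r : Int) + 1
        omega
      · show (r : Int) + 1 < (rc.length : Int)
        omega
      · show (0:Int) ≤ ((m-1 : Nat) : Int) + 0
        omega
      · show ((m-1 : Nat) : Int) + 0 < ((rc.headD []).length : Int)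
        rw [show (rc.headD []).length = rowlen rc from rfl]
        omega

theorem runLeft (copy : List (List Int)) :
    ∀ (c e : Nat) (rc : List (List Int)) (n : Nat),
      rc.length = n → 0 < n → c < rowlen rc →
      rotWhile copy 0 (-1) (c+1+e) (rc, ((n-1 : Nat) : Int), (c : Int)) =
        (applyPairs copy (pairsFrom (n-1, c) ((List.range c).reverse.map (fun j => (n-1, j)))) rc,
         ((n-1 : Nat) : Int), (0 : Int)) := by
  intro c
  induction c with
  | zero =>
    intro e rc n hn h0 hc
    rw [rotWhile_stop]
    · simp [pairsFrom_nil, applyPairs_nil]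
    · intro h
      have := h.2.2.1
      omega
  | succ c ih =>
    intro e rc n hn h0 hc
    have hf : c+1+1+e = (c+1+e)+1 := by omega
    rw [hf, rotWhile]
    rw [if_pos]
    · have hnx : (((n-1 : Nat) : Int) + 0).toNat = n - 1 := by omega
      have hny : (((c+1 : Nat) : Int) + (-1)).toNat = c := by omega
      have hrn : (((n-1 : Nat) : Int)).toNat = n - 1 := by omega
      have hcc : (((c+1 : Nat) : Int)).toNat = c + 1 := by omega
      simp only [hnx, hny, hrn, hcc]
      have hcast : (((n-1 : Nat) : Int) + 0) = ((n-1 : Nat) : Int) := by ring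
      have hcast2 : (((c+1 : Nat) : Int) + (-1)) = ((c : Nat) : Int) := by push_cast; ring
      rw [hcast, hcast2]
      have h1' : (set2 rc (n-1) c (get2 copy (n-1) (c+1))).length = n := by
        rw [length_set2]; exact hn
      have h2' : c < rowlen (set2 rc (n-1) c (get2 copy (n-1) (c+1))) := by
        rw [rowlen_set2]; omega
      rw [ih e _ n h1' h0 h2']
      rw [List.range_succ, List.reverse_append, List.reverse_singleton,
        List.singleton_append, List.map_cons, pairsFrom_cons, applyPairs_cons]
    · refine ⟨Or.inr (Or.inl ?_), ⟨?_, ?_⟩, ⟨?_, ?_⟩⟩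
      · show ((n-1 : Nat) : Int) = (rc.length : Int) - 1
        omega
      · show (0:Int) ≤ ((n-1 : Nat) : Int) + 0
        omega
      · show ((n-1 : Nat) : Int) + 0 < (rc.length : Int)
        omega
      · show (0:Int) ≤ ((c+1 : Nat) : Int) + (-1)
        omega
      · show ((c+1 : Nat) : Int) + (-1) < ((rc.headD []).length : Int)
        rw [show (rc.headD []).length = rowlen rc from rfl]
        omega

theorem runUp (copy : List (List Int)) :
    ∀ (r e : Nat) (rc : List (List Int)) (m : Nat),
      r < rc.length → rowlen rc = m → 0 < m →
      rotWhile copy (-1) 0 (r+1+e) (rc, (r : Int), (0 : Int)) =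
        (applyPairs copy (pairsFrom (r, 0) ((List.range r).reverse.map (fun i => (i, (0:Nat))))) rc,
         (0 : Int), (0 : Int)) := by
  intro r
  induction r with
  | zero =>
    intro e rc m hr hm h2
    rw [rotWhile_stop]
    · simp [pairsFrom_nil, applyPairs_nil]
    · intro h
      have := h.2.1.1
      omega
  | succ r ih =>
    intro e rc m hr hm h2
    have hf : r+1+1+e = (r+1+e)+1 := by omega
    rw [hf, rotWhile]
    rw [if_pos]
    · have hnx : (((r+1 : Nat) : Int) + (-1)).toNat = r := by omega
      have hny : ((0 : Int) + 0).toNat = 0 := rfl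
      have hrr : (((r+1 : Nat) : Int)).toNat = r + 1 := by omega
      have hc0 : (0 : Int).toNat = 0 := rfl
      simp only [hnx, hny, hrr, hc0]
      have hcast : (((r+1 : Nat) : Int) + (-1)) = ((r : Nat) : Int) := by push_cast; ring
      have hcast2 : ((0 : Int) + 0) = (0 : Int) := by ring
      rw [hcast, hcast2]
      have h1' : r < (set2 rc r 0 (get2 copy (r+1) 0)).length := by
        rw [length_set2]; omega
      have h2' : rowlen (set2 rc r 0 (get2 copy (r+1) 0)) = m := by
        rw [rowlen_set2]; exact hm
      rw [ih e _ m h1' h2' h2]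
      rw [List.range_succ, List.reverse_append, List.reverse_singleton,
        List.singleton_append, List.map_cons, pairsFrom_cons, applyPairs_cons]
    · refine ⟨Or.inr (Or.inr (Or.inl rfl)), ⟨?_, ?_⟩, ⟨?_, ?_⟩⟩
      · show (0:Int) ≤ ((r+1 : Nat) : Int) + (-1)
        omega
      · show ((r+1 : Nat) : Int) + (-1) < (rc.length : Int)
        omega
      · show (0:Int) ≤ (0 : Int) + 0
        omega
      · show (0 : Int) + 0 < ((rc.headD []).length : Int)
        rw [show (rc.headD []).length = rowlen rc from rfl]
        omega

theorem rotate_eq (rc : List (List Int)) : pyRotate rc = rotB rc := by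
  cases rc with
  | nil => rfl
  | cons a t =>
    by_cases hm0 : a.length = 0
    · -- first row empty: both sides leave the matrix unchanged
      have hB : rotB (a :: t) = a :: t := by
        have : a.isEmpty = true := by
          cases a
          · rfl
          · simp at hm0
        simp [rotB, this]
      have c1 := rotWhile_stop (a::t) 0 1 ((a::t).length + ((a::t).headD []).length + 1)
        (a::t) 0 0 (by intro h; have := h.2.2.2; simp only [List.headD_cons] at this; omega)
      have c2 := rotWhile_stop (a::t) 1 0 ((a::t).length + ((a::t).headD []).length + 1)
        (a::t) 0 0 (by intro h; have := h.2.2.2; simp only [List.headD_cons] at this; omega)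
      have c3 := rotWhile_stop (a::t) 0 (-1) ((a::t).length + ((a::t).headD []).length + 1)
        (a::t) 0 0 (by intro h; have := h.2.2.1; omega)
      have c4 := rotWhile_stop (a::t) (-1) 0 ((a::t).length + ((a::t).headD []).length + 1)
        (a::t) 0 0 (by intro h; have := h.2.1.1; omega)
      simp only [pyRotate, pvMove, List.foldl_cons, List.foldl_nil]
      rw [c1, c2, c3, c4, hB]
    · -- main case: first row nonempty (no assumption on the other rows' lengths)
      obtain ⟨M, hM⟩ : ∃ M, a.length = M + 1 := ⟨a.length - 1, by omega⟩
      have hrl : rowlen (a :: t) = M + 1 := hM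
      have hF : (a::t).length + ((a::t).headD []).length + 1 = t.length + 1 + (M + 1) + 1 := by
        simp only [List.length_cons, List.headD_cons]
        omega
      -- stage 1: walk right along the top row
      have s1 : rotWhile (a::t) 0 1 (t.length + 1 + (M + 1) + 1) (a::t, 0, (0:Int)) =
          (applyPairs (a::t) (pairsFrom (0, 0) ((List.range M).map (fun t => ((0:Nat), 0+1+t)))) (a::t),
           0, ((0 + M : Nat) : Int)) := by
        have h := runRight (a::t) M (t.length + 2) (a::t) 0 (by simp) (by rw [hrl]; omega)
        rw [show M + 1 + (t.length + 2) = t.length + 1 + (M + 1) + 1 from by omega] at h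
        exact h
      -- stage 2: walk down the right column
      have s2 : rotWhile (a::t) 1 0 (t.length + 1 + (M + 1) + 1)
          (applyPairs (a::t) (pairsFrom (0, 0) ((List.range M).map (fun t => ((0:Nat), 0+1+t)))) (a::t),
           0, ((M + 1 - 1 : Nat) : Int)) =
          (applyPairs (a::t)
             (pairsFrom (0, M + 1 - 1) ((List.range t.length).map (fun t => (0+1+t, M + 1 - 1))))
             (applyPairs (a::t) (pairsFrom (0, 0) ((List.range M).map (fun t => ((0:Nat), 0+1+t)))) (a::t)),
           ((0 + t.length : Nat) : Int), ((M + 1 - 1 : Nat) : Int)) := by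
        have h := runDown (a::t) t.length (M + 2)
          (applyPairs (a::t) (pairsFrom (0, 0) ((List.range M).map (fun t => ((0:Nat), 0+1+t)))) (a::t))
          0 (M + 1)
          (by rw [length_applyPairs]; simp)
          (by rw [rowlen_applyPairs]; exact hrl)
          (by omega)
        rw [show t.length + 1 + (M + 2) = t.length + 1 + (M + 1) + 1 from by omega] at h
        exact h
      -- stage 3: walk left along the bottom row
      have s3 : rotWhile (a::t) 0 (-1) (t.length + 1 + (M + 1) + 1)
          ((applyPairs (a::t) (pairsFrom (0, M) ((List.range t.length).map (fun t => (0+1+t, M)))) (applyPairs (a::t) (pairsFrom (0, 0) ((List.range M).map (fun t => ((0:Nat), 0+1+t)))) (a::t))), ((t.length + 1 - 1 : Nat) : Int), ((M : Nat) : Int)) =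
          ((applyPairs (a::t) (pairsFrom (t.length + 1 - 1, M) ((List.range M).reverse.map (fun j => (t.length + 1 - 1, j)))) (applyPairs (a::t) (pairsFrom (0, M) ((List.range t.length).map (fun t => (0+1+t, M)))) (applyPairs (a::t) (pairsFrom (0, 0) ((List.range M).map (fun t => ((0:Nat), 0+1+t)))) (a::t)))), ((t.length + 1 - 1 : Nat) : Int), (0 : Int)) := by
        have h := runLeft (a::t) M (t.length + 2) (applyPairs (a::t) (pairsFrom (0, M) ((List.range t.length).map (fun t => (0+1+t, M)))) (applyPairs (a::t) (pairsFrom (0, 0) ((List.range M).map (fun t => ((0:Nat), 0+1+t)))) (a::t))) (t.length + 1)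
          (by rw [length_applyPairs, length_applyPairs]; simp)
          (by omega)
          (by rw [rowlen_applyPairs, rowlen_applyPairs, hrl]; omega)
        rw [show M + 1 + (t.length + 2) = t.length + 1 + (M + 1) + 1 from by omega] at h
        exact h
      -- stage 4: walk up the left column
      have s4 : rotWhile (a::t) (-1) 0 (t.length + 1 + (M + 1) + 1)
          ((applyPairs (a::t) (pairsFrom (t.length, M) ((List.range M).reverse.map (fun j => (t.length, j)))) (applyPairs (a::t) (pairsFrom (0, M) ((List.range t.length).map (fun t => (0+1+t, M)))) (applyPairs (a::t) (pairsFrom (0, 0) ((List.range M).map (fun t => ((0:Nat), 0+1+t)))) (a::t)))), ((t.length : Nat) : Int), (0 : Int)) =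
          (applyPairs (a::t) (pairsFrom (t.length, 0) ((List.range t.length).reverse.map (fun i => (i, (0:Nat))))) (applyPairs (a::t) (pairsFrom (t.length, M) ((List.range M).reverse.map (fun j => (t.length, j)))) (applyPairs (a::t) (pairsFrom (0, M) ((List.range t.length).map (fun t => (0+1+t, M)))) (applyPairs (a::t) (pairsFrom (0, 0) ((List.range M).map (fun t => ((0:Nat), 0+1+t)))) (a::t)))), (0 : Int), (0 : Int)) := by
        have h := runUp (a::t) t.length (M + 2) (applyPairs (a::t) (pairsFrom (t.length, M) ((List.range M).reverse.map (fun j => (t.length, j)))) (applyPairs (a::t) (pairsFrom (0, M) ((List.range t.length).map (fun t => (0+1+t, M)))) (applyPairs (a::t) (pairsFrom (0, 0) ((List.range M).map (fun t => ((0:Nat), 0+1+t)))) (a::t)))) (M + 1)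
          (by rw [length_applyPairs, length_applyPairs, length_applyPairs]; simp)
          (by rw [rowlen_applyPairs, rowlen_applyPairs, rowlen_applyPairs]; exact hrl)
          (by omega)
        rw [show t.length + 1 + (M + 2) = t.length + 1 + (M + 1) + 1 from by omega] at h
        exact h
      have haE : a.isEmpty = false := by
        cases a
        · simp at hM
        · rfl
      have hpath : borderPath (t.length + 1) (M + 1) =
          ((0:Nat), (0:Nat)) :: (((List.range M).map ((fun j => ((0:Nat), j)) ∘ Nat.succ)) ++ (((List.range t.length).map (fun i => (1+i, M))) ++ (((List.range M).reverse.map (fun j => (t.length, j))) ++ ((List.range t.length).reverse.map (fun i => (i, (0:Nat))))))) := by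
        simp only [borderPath, Nat.add_sub_cancel, List.range_succ_eq_map, List.map_cons,
          List.map_map, List.cons_append, List.append_assoc]
      have hd1 : (((List.range M).map ((fun j => ((0:Nat), j)) ∘ Nat.succ))).getLastD ((0:Nat), (0:Nat)) = (0, M) := by
        rw [getLastD_map_range]
        rcases M with _ | k <;> simp
      have hd2 : (((List.range t.length).map (fun i => (1+i, M)))).getLastD ((0:Nat), M) = (t.length, M) := by
        rw [getLastD_map_range]
        rcases ht : t.length with _ | k
        · simp
        · simp [Nat.add_comm]
      have hd3 : (((List.range M).reverse.map (fun j => (t.length, j)))).getLastD (t.length, M) = (t.length, (0:Nat)) := by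
        rw [getLastD_reverse_map_range]
        rcases M with _ | k <;> simp
      have hf1 : ((fun j => ((0:Nat), j)) ∘ Nat.succ) = (fun t => ((0:Nat), 0+1+t)) := by
        funext x
        simp only [Function.comp_apply, Prod.mk.injEq, true_and]
        omega
      have hf2 : (fun i => (1+i, M)) = (fun t => (0+1+t, M)) := by
        funext x
        simp only []
      simp only [pyRotate, pvMove, List.foldl_cons, List.foldl_nil]
      rw [hF, s1]
      rw [show (0 + M : Nat) = M + 1 - 1 from by omega]
      rw [s2]
      rw [show (0 + t.length : Nat) = t.length + 1 - 1 from by omega]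
      rw [show (M + 1 - 1 : Nat) = M from by omega]
      rw [s3]
      rw [show (t.length + 1 - 1 : Nat) = t.length from by omega]
      rw [s4]
      show applyPairs (a::t) (pairsFrom (t.length, 0) ((List.range t.length).reverse.map (fun i => (i, (0:Nat))))) (applyPairs (a::t) (pairsFrom (t.length, M) ((List.range M).reverse.map (fun j => (t.length, j)))) (applyPairs (a::t) (pairsFrom (0, M) ((List.range t.length).map (fun t => (0+1+t, M)))) (applyPairs (a::t) (pairsFrom (0, 0) ((List.range M).map (fun t => ((0:Nat), 0+1+t)))) (a::t)))) = rotB (a::t)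
      rw [rotB]
      rw [if_neg (by simp [haE])]
      simp only [List.length_cons, List.headD_cons, hM, hpath, List.tail_cons,
        List.zip_map_right, List.foldl_map]
      show applyPairs (a::t) (pairsFrom (t.length, 0) ((List.range t.length).reverse.map (fun i => (i, (0:Nat))))) (applyPairs (a::t) (pairsFrom (t.length, M) ((List.range M).reverse.map (fun j => (t.length, j)))) (applyPairs (a::t) (pairsFrom (0, M) ((List.range t.length).map (fun t => (0+1+t, M)))) (applyPairs (a::t) (pairsFrom (0, 0) ((List.range M).map (fun t => ((0:Nat), 0+1+t)))) (a::t)))) =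
        applyPairs (a::t) (pairsFrom ((0:Nat), (0:Nat)) (((List.range M).map ((fun j => ((0:Nat), j)) ∘ Nat.succ)) ++ (((List.range t.length).map (fun i => (1+i, M))) ++ (((List.range M).reverse.map (fun j => (t.length, j))) ++ ((List.range t.length).reverse.map (fun i => (i, (0:Nat)))))))) (a::t)
      rw [← applyPairs_append, ← applyPairs_append, ← applyPairs_append]
      congr 1
      rw [pairsFrom_append, hd1, pairsFrom_append, hd2, pairsFrom_append, hd3, hf1, hf2]

theorem drop_pred {A : Type} : ∀ (a : A) (t : List A),
    (a :: t).drop t.length = [(a :: t).getLast (by simp)] := by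
  intro a t
  induction t generalizing a with
  | nil => rfl
  | cons b t ih => simpa [List.getLast_cons] using ih b

theorem solution_cons (rc : List (List Int)) (op : String) (ops : List String) :
    solution rc (op :: ops) =
      solution (if op = "ShiftRow" then
          (match rc.getLast? with
            | some last => last :: rc.dropLast
            | none => rc)
        else pyRotate rc) ops := rfl

theorem solution_alt_cons (rc : List (List Int)) (op : String) (ops : List String) :
    solution_alt rc (op :: ops) =
      solution_alt (if op = "ShiftRow" then
          rc.drop (rc.length - 1) ++ rc.take (rc.length - 1)
        else rotB rc) ops := rfl

theorem shift_eq (a : List Int) (t : List (List Int)) :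
    ((a :: t).getLast (by simp)) :: (a :: t).dropLast =
      (a :: t).drop ((a :: t).length - 1) ++ (a :: t).take ((a :: t).length - 1) := by
  simp only [List.length_cons, Nat.add_sub_cancel]
  rw [drop_pred, List.singleton_append, List.dropLast_eq_take]
  simp

-- in the total Lean semantics the two ports agree on EVERY input
-- (the inputs where the Pythons raise are excluded by Pre_)
theorem fold_all : ∀ (ops : List String) (rc : List (List Int)),
    solution rc ops = solution_alt rc ops := by
  intro ops
  induction ops with
  | nil => intro rc; rfl
  | cons op ops ih =>
    intro rc
    rw [solution_cons, solution_alt_cons]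
    by_cases hop : op = "ShiftRow"
    · rw [if_pos hop, if_pos hop]
      cases rc with
      | nil => exact ih []
      | cons a t =>
        have hsome : (a :: t).getLast? = some ((a :: t).getLast (by simp)) :=
          List.getLast?_eq_some_getLast _
        simp only [hsome]
        rw [← shift_eq a t]
        exact ih _
    · rw [if_neg hop, if_neg hop, rotate_eq rc]
      exact ih _

-- ===== VERDICT (by name: the statement is the Claim_ definition above) =====
theorem solution_spec : Claim_equal_solution := by
  intro rc ops _ _
  exact fold_all ops rc
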